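-- pv_equiv track=rewrite | github.com/EvanA4/EEPMs | eepms/pt2/helpers.py | get_retro_times
-- ===== SOURCE A (Python) =====
-- def get_retro_times(cumu_longs):
--     is_in_retrograde = False
--     tmp_retro_start = -1
--     retro_times: list[tuple[int, int]] = []
--     for i in range(2, len(cumu_longs)):
--         first = cumu_longs[i - 1] - cumu_longs[i - 2]
--         second = cumu_longs[i] - cumu_longs[i - 1]
--         if first > 0 > second and not is_in_retrograde:
--             is_in_retrograde = True
--             tmp_retro_start = i
--         if first < 0 < second and is_in_retrograde:
--             is_in_retrograde = False
--             retro_times.append((tmp_retro_start, i))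
--             tmp_retro_start = -1
--     return retro_times
-- ===== SOURCE B (Python) =====
-- def get_retro_times(cumu_longs):
--     # Collect all peak indices and all trough indices as two separate sorted
--     # lists, then pair them with a two-pointer merge: take the next unused
--     # peak, advance the trough pointer past it, emit (peak, trough), then
--     # advance the peak pointer past that trough. A dangling final peak with
--     # no later trough yields nothing.
--     n = len(cumu_longs)
--     peaks = [j for j in range(2, n)
--              if cumu_longs[j - 1] > cumu_longs[j - 2] and cumu_longs[j] < cumu_longs[j - 1]]
--     troughs = [j for j in range(2, n)
--                if cumu_longs[j - 1] < cumu_longs[j - 2] and cumu_longs[j] > cumu_longs[j - 1]]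
--     out = []
--     pi = 0
--     ti = 0
--     while pi < len(peaks):
--         p = peaks[pi]
--         while ti < len(troughs) and troughs[ti] <= p:
--             ti += 1
--         if ti == len(troughs):
--             break
--         t = troughs[ti]
--         ti += 1
--         out.append((p, t))
--         while pi < len(peaks) and peaks[pi] <= t:
--             pi += 1
--     return out
-- ===== Notes on version B (the rewrite author's own statement) =====
-- stated objective: alternative
-- what changed: Replaces A's single stateful scan carrying an in-retrograde flag by building two separate sorted lists of peak indices and trough indices and pairing them with a two-pointer merge (next peak, first trough after it, then skip peaks up to that trough).
import Mathlib
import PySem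

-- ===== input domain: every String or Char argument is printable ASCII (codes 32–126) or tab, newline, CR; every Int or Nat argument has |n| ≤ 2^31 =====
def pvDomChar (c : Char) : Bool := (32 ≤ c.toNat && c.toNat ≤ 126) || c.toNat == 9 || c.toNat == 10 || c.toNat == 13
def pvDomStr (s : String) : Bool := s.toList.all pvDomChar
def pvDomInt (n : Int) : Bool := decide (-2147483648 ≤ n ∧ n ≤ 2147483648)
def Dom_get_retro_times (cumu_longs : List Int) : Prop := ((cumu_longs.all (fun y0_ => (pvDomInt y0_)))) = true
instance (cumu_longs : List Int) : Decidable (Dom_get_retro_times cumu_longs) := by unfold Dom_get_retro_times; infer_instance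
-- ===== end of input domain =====

-- B replaces A's fused stateful scan by two separate peak/trough index lists paired by a recursive merge; objective: alternative.

-- ===== PORT A =====
-- A's loop body (indices i ∈ range(2, len) are always in range, so pyGetD's default 0 is never used)
def retroStepA (cumu_longs : List Int) (st : Bool × Int × List (Int × Int)) (i : Int) :
    Bool × Int × List (Int × Int) :=
  let first := PySem.List.pyGetD cumu_longs (i - 1) 0 - PySem.List.pyGetD cumu_longs (i - 2) 0
  let second := PySem.List.pyGetD cumu_longs i 0 - PySem.List.pyGetD cumu_longs (i - 1) 0
  let st1 := if first > 0 ∧ 0 > second ∧ st.1 = false then (true, i, st.2.2) else st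
  if first < 0 ∧ 0 < second ∧ st1.1 = true then (false, -1, st1.2.2 ++ [(st1.2.1, i)]) else st1

def get_retro_times (cumu_longs : List Int) : List (Int × Int) :=
  let st := (PySem.List.pyRange 2 (cumu_longs.length : Int) 1).foldl (retroStepA cumu_longs)
    (false, -1, [])
  st.2.2

-- ===== PORT B =====
-- B's peak / trough tests (same in-range indexing remark as above)
def retroPeak (c : List Int) (j : Int) : Bool :=
  decide (PySem.List.pyGetD c (j - 1) 0 > PySem.List.pyGetD c (j - 2) 0 ∧
          PySem.List.pyGetD c j 0 < PySem.List.pyGetD c (j - 1) 0)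

def retroTrough (c : List Int) (j : Int) : Bool :=
  decide (PySem.List.pyGetD c (j - 1) 0 < PySem.List.pyGetD c (j - 2) 0 ∧
          PySem.List.pyGetD c j 0 > PySem.List.pyGetD c (j - 1) 0)

-- B's two-pointer merge of the two sorted index lists (the while loops over
-- pointers pi/ti become structural recursion on the corresponding suffixes);
-- the head lemma below is cited by the termination proof
lemma retro_dropWhile_head {α : Type} (p : α → Bool) (ts : List α) (t : α) (ts'' : List α)
    (h : ts.dropWhile p = t :: ts'') : p t = false := by
  induction ts with
  | nil => simp at h
  | cons a ts ih =>
    rw [List.dropWhile_cons] at h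
    split at h
    · exact ih h
    · cases h; simp_all

def retroMerge : List Int → List Int → List (Int × Int)
  | [], _ => []
  | p :: ps, ts =>
    match h : ts.dropWhile (fun t => t ≤ p) with
    | [] => []
    | t :: ts'' => (p, t) :: retroMerge ((p :: ps).dropWhile (fun q => q ≤ t)) ts''
termination_by ps _ => ps.length
decreasing_by
  have hpt : p < t := by
    have := retro_dropWhile_head _ _ _ _ h
    simp at this
    omega
  have hle : decide (p ≤ t) = true := by simp; omega
  simp only [List.dropWhile_cons, hle, if_true]
  exact Nat.lt_succ_of_le (List.length_dropWhile_le _ _)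

def get_retro_times_alt (cumu_longs : List Int) : List (Int × Int) :=
  let r := PySem.List.pyRange 2 (cumu_longs.length : Int) 1
  retroMerge (r.filter (retroPeak cumu_longs)) (r.filter (retroTrough cumu_longs))

-- ===== PRECONDITION & SPEC =====
def Spec_get_retro_times (cumu_longs : List Int) (out : List (Int × Int)) : Prop := out = get_retro_times_alt cumu_longs
instance (cumu_longs : List Int) (out : List (Int × Int)) : Decidable (Spec_get_retro_times cumu_longs out) := by unfold Spec_get_retro_times; infer_instance

-- ===== CLAIM (what is proved, stated in full; the proofs are below) =====
def Claim_equal_get_retro_times : Prop := ∀ (cumu_longs : List Int), Dom_get_retro_times cumu_longs → Spec_get_retro_times cumu_longs (get_retro_times cumu_longs)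

-- ===== LEMMAS AND PROOFS =====

lemma retroMerge_nil (ts : List Int) : retroMerge [] ts = [] := by
  simp [retroMerge]

lemma retroMerge_cons (p : Int) (ps ts : List Int) :
    retroMerge (p :: ps) ts =
      match ts.dropWhile (fun t => t ≤ p) with
      | [] => []
      | t :: ts'' => (p, t) :: retroMerge ((p :: ps).dropWhile (fun q => q ≤ t)) ts'' := by
  rw [retroMerge]
  cases hts : ts.dropWhile (fun t => decide (t ≤ p)) <;> simp_all

-- A's loop body characterised by B's peak/trough tests
lemma stepA_eq (c : List Int) (i : Int) (b : Bool) (tmp : Int) (acc : List (Int × Int)) :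
    retroStepA c (b, tmp, acc) i =
      if retroPeak c i then (if b then (b, tmp, acc) else (true, i, acc))
      else if retroTrough c i then (if b then (false, -1, acc ++ [(tmp, i)]) else (b, tmp, acc))
      else (b, tmp, acc) := by
  cases b <;> simp only [retroStepA, retroPeak, retroTrough, decide_eq_true_eq] <;>
    split_ifs <;> first | rfl | omega | (exfalso; omega) | simp_all

-- dropping a leading trough that precedes every peak
lemma retroMerge_drop_trough (i : Int) (ps ts : List Int) (h : ∀ p ∈ ps, i < p) :
    retroMerge ps (i :: ts) = retroMerge ps ts := by
  cases ps with
  | nil => simp [retroMerge_nil]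
  | cons p ps' =>
    have : i ≤ p := by have := h p (List.mem_cons_self); omega
    rw [retroMerge_cons, retroMerge_cons]
    simp [List.dropWhile_cons, this]

-- the two-state invariant tying A's fold to B's merge
lemma retro_inv (c : List Int) (l : List Int) (hl : l.Pairwise (· < ·)) :
    (∀ tmp acc, (l.foldl (retroStepA c) (false, tmp, acc)).2.2
        = acc ++ retroMerge (l.filter (retroPeak c)) (l.filter (retroTrough c)))
    ∧ (∀ s acc, (l.foldl (retroStepA c) (true, s, acc)).2.2
        = acc ++ match l.filter (retroTrough c) with
            | [] => []
            | t :: ts => (s, t) :: retroMerge ((l.filter (retroPeak c)).dropWhile (fun q => q ≤ t)) ts) := by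
  induction l with
  | nil => simp [retroMerge_nil]
  | cons i l ih =>
    have hgt : ∀ x ∈ l, i < x := by
      intro x hx; exact (List.pairwise_cons.mp hl).1 x hx
    obtain ⟨ihF, ihT⟩ := ih (List.pairwise_cons.mp hl).2
    have hPgt : ∀ p ∈ l.filter (retroPeak c), i < p := fun p hp => hgt p (List.mem_filter.mp hp).1
    have hTgt : ∀ t ∈ l.filter (retroTrough c), i < t := fun t ht => hgt t (List.mem_filter.mp ht).1
    have hexcl : ∀ j, retroPeak c j = true → retroTrough c j = false := by
      intro j hj
      simp only [retroPeak, decide_eq_true_eq] at hj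
      simp only [retroTrough, decide_eq_false_iff_not]
      omega
    constructor
    · intro tmp acc
      simp only [List.foldl_cons, stepA_eq]
      by_cases hp : retroPeak c i = true
      · -- peak: enter retrograde with start i
        simp only [hp, if_true, Bool.false_eq_true, if_false, List.filter_cons,
          hexcl i hp, ihT i acc]
        rw [retroMerge_cons]
        cases hts : l.filter (retroTrough c) with
        | nil => simp
        | cons t ts =>
          have hit : i < t := hTgt t (by rw [hts]; exact List.mem_cons_self)
          have hnti : ¬ (t ≤ i) := by omega
          have hile : i ≤ t := by omega
          simp [hnti, hile]
      · -- not a peak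
        simp only [hp, List.filter_cons]
        by_cases ht : retroTrough c i = true
        · -- trough in non-retrograde state: skipped by A, dropped by merge
          simp only [ht, if_true, Bool.false_eq_true, if_false, ihF tmp acc]
          rw [retroMerge_drop_trough i _ _ hPgt]
        · simp [ht, ihF tmp acc]
    · intro s acc
      simp only [List.foldl_cons, stepA_eq]
      by_cases hp : retroPeak c i = true
      · -- peak while already in retrograde: ignored by A, filtered out by merge
        simp only [hp, if_true, List.filter_cons, hexcl i hp, ihT s acc]
        cases hts : l.filter (retroTrough c) with
        | nil => simp
        | cons t ts =>
          have hit : i < t := hTgt t (by rw [hts]; exact List.mem_cons_self)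
          simp [show i ≤ t by omega]
      · simp only [hp, List.filter_cons]
        by_cases ht : retroTrough c i = true
        · -- trough: emit (s, i) and leave retrograde
          simp only [ht, if_true, Bool.false_eq_true, if_false]
          rw [ihF (-1) (acc ++ [(s, i)])]
          have hpe : (l.filter (retroPeak c)).dropWhile (fun q => decide (q ≤ i))
              = l.filter (retroPeak c) := by
            cases hpl : l.filter (retroPeak c) with
            | nil => rfl
            | cons a as =>
              have : i < a := hPgt a (by rw [hpl]; exact List.mem_cons_self)
              simp [show ¬ (a ≤ i) by omega]
          rw [hpe]
          simp
        · simp [ht, ihT s acc]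

-- ===== VERDICT (by name: the statement is the Claim_ definition above) =====
theorem get_retro_times_spec : Claim_equal_get_retro_times := by
  intro c _
  unfold Spec_get_retro_times get_retro_times get_retro_times_alt
  exact (retro_inv c _ (PySem.List.pairwise_lt_pyRange_one 2 (c.length : Int))).1 (-1) []
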